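-- pv_equiv track=rewrite | github.com/realnihaoworld/CSC131 | Assignments/01/01_Squad_Names_DZ.py | calculate
-- ===== SOURCE A (Python) =====
-- def begin(name, search):
--     return name.startswith(search)
--
-- def end(name, search):
--     return name.endswith(search)
--
-- def contain(name, search):
--     return (search in name)
--
-- def calculate(name_list, substring):
--     results = [0, 0, 0]
--
--     for name in name_list:
--         if begin(name, substring):
--             results[0] += 1
--
--     for name in name_list:
--         if end(name, substring):
--             results[1] += 1
--
--     for name in name_list:
--         if contain(name, substring):
--             results[2] += 1
--
--     return results
-- ===== SOURCE B (Python) =====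
-- def calculate(name_list, substring):
--     m = len(substring)
--     begin = end = contain = 0
--     for name in name_list:
--         positions = [i for i in range(len(name) - m + 1)
--                      if name[i:i+m] == substring]
--         if 0 in positions:
--             begin += 1
--         if len(name) - m in positions:
--             end += 1
--         if positions:
--             contain += 1
--     return [begin, end, contain]
-- ===== Notes on version B (the rewrite author's own statement) =====
-- stated objective: alternative
-- what changed: Instead of three separate scans testing startswith/endswith/in per name, B enumerates for each name the list of all occurrence positions of the substring by explicit slice comparison and reads all three counts off that one enumeration (0 in positions, len(name)-len(substring) in positions, positions non-empty), in a single pass with three counters.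
import Mathlib
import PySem

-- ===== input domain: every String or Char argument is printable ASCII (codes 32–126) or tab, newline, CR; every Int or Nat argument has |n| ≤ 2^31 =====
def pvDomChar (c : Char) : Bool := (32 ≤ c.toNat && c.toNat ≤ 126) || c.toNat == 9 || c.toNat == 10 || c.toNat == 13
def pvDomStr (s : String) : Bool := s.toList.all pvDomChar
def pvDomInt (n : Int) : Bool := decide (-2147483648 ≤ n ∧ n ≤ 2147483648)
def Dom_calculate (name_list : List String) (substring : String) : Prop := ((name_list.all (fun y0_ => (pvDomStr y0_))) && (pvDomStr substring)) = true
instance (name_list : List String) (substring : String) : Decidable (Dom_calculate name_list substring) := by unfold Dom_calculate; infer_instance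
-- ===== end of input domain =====

-- B derives all three counts per name from one explicit enumeration of the substring's
-- occurrence positions by slice comparison, instead of A's three startswith/endswith/in scans
-- (objective: alternative).


-- ===== PORT A =====
def pyBegin (name : String) (search : String) : Bool := PySem.Str.startswith name search

def pyEnd (name : String) (search : String) : Bool := PySem.Str.endswith name search

def pyContain (name : String) (search : String) : Bool := PySem.Str.isIn search name

-- results = [0,0,0]; three successive loops, each incrementing one slot of the list.
def calculate (name_list : List String) (substring : String) : List Int :=
  let results : List Int := [0, 0, 0]
  let results :=
    name_list.foldl (fun r name =>
      if pyBegin name substring then r.set 0 (r.getD 0 0 + 1) else r) results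
  let results :=
    name_list.foldl (fun r name =>
      if pyEnd name substring then r.set 1 (r.getD 1 0 + 1) else r) results
  let results :=
    name_list.foldl (fun r name =>
      if pyContain name substring then r.set 2 (r.getD 2 0 + 1) else r) results
  results

-- ===== PORT B =====
-- positions = [i for i in range(len(name)-m+1) if name[i:i+m] == substring]
def pyPositions (name : String) (substring : String) : List Int :=
  (PySem.List.pyRange 0 (PySem.Str.len name - PySem.Str.len substring + 1) 1).filter
    (fun i => PySem.Str.slice name (some i) (some (i + PySem.Str.len substring)) == substring)

-- one pass; per name enumerate occurrence positions, read the three tests off that list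
def calculate_alt (name_list : List String) (substring : String) : List Int :=
  let t := name_list.foldl (fun (s : Int × Int × Int) name =>
      let positions := pyPositions name substring
      (if positions.contains 0 then s.1 + 1 else s.1,
       if positions.contains (PySem.Str.len name - PySem.Str.len substring) then s.2.1 + 1 else s.2.1,
       if !positions.isEmpty then s.2.2 + 1 else s.2.2))
    (0, 0, 0)
  [t.1, t.2.1, t.2.2]

-- ===== PRECONDITION & SPEC =====
def Spec_calculate (name_list : List String) (substring : String) (out : List Int) : Prop := out = calculate_alt name_list substring
instance (name_list : List String) (substring : String) (out : List Int) : Decidable (Spec_calculate name_list substring out) := by unfold Spec_calculate; infer_instance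

-- ===== CLAIM (what is proved, stated in full; the proofs are below) =====
def Claim_equal_calculate : Prop := ∀ (name_list : List String) (substring : String), Dom_calculate name_list substring → Spec_calculate name_list substring (calculate name_list substring)

-- ===== LEMMAS AND PROOFS =====

theorem mem_pyPositions (name substring : String) (i : Int) :
    i ∈ pyPositions name substring ↔
      0 ≤ i ∧ i ≤ (name.toList.length : Int) - substring.toList.length ∧
        substring.toList <+: name.toList.drop i.toNat := by
  unfold pyPositions
  rw [List.mem_filter]
  simp only [PySem.List.mem_pyRange_one, beq_iff_eq, String.ext_iff, PySem.Str.toList_slice,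
    PySem.Chars.slice_eq_listSlice, PySem.Str.len_eq]
  constructor
  · rintro ⟨⟨h0, hlt⟩, heq⟩
    rw [PySem.List.slice_toNat name.toList h0 (by omega)] at heq
    have hm : (i + ↑substring.toList.length).toNat - i.toNat = substring.toList.length := by omega
    rw [hm] at heq
    refine ⟨h0, by omega, ?_⟩
    rw [List.prefix_iff_eq_take]
    exact heq.symm
  · rintro ⟨h0, hle, hpre⟩
    refine ⟨⟨h0, by omega⟩, ?_⟩
    rw [PySem.List.slice_toNat name.toList h0 (by omega)]
    have hm : (i + ↑substring.toList.length).toNat - i.toNat = substring.toList.length := by omega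
    rw [hm]
    exact (List.prefix_iff_eq_take.mp hpre).symm

theorem positions_contains_zero (name substring : String) :
    (pyPositions name substring).contains 0 = pyBegin name substring := by
  unfold pyBegin
  rw [Bool.eq_iff_iff, List.contains_iff_mem, mem_pyPositions, PySem.Str.startswith_eq,
    PySem.Chars.startswith_iff]
  constructor
  · rintro ⟨-, -, hpre⟩; simpa using hpre
  · intro hpre
    have := hpre.length_le
    exact ⟨le_refl _, by simp at this ⊢; omega, by simpa using hpre⟩

theorem positions_contains_last (name substring : String) :
    (pyPositions name substring).contains (PySem.Str.len name - PySem.Str.len substring)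
      = pyEnd name substring := by
  unfold pyEnd
  rw [Bool.eq_iff_iff, List.contains_iff_mem, mem_pyPositions, PySem.Str.endswith_eq,
    PySem.Chars.endswith_iff, PySem.Str.len_eq, PySem.Str.len_eq]
  constructor
  · rintro ⟨h0, -, hpre⟩
    have hnat : ((name.toList.length : Int) - substring.toList.length).toNat
        = name.toList.length - substring.toList.length := by omega
    rw [hnat] at hpre
    have hlen : (name.toList.drop (name.toList.length - substring.toList.length)).length
        = substring.toList.length := by
      rw [List.length_drop]; omega
    exact List.suffix_iff_eq_drop.mpr (hpre.eq_of_length hlen.symm)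
  · intro hsuf
    have hle := hsuf.length_le
    refine ⟨by omega, by omega, ?_⟩
    have hnat : ((name.toList.length : Int) - substring.toList.length).toNat
        = name.toList.length - substring.toList.length := by omega
    rw [hnat, ← List.suffix_iff_eq_drop.mp hsuf]

theorem positions_nonempty (name substring : String) :
    (!(pyPositions name substring).isEmpty) = pyContain name substring := by
  unfold pyContain
  rw [Bool.eq_iff_iff, PySem.Str.isIn_eq, ← PySem.Chars.exists_prefix_drop_iff_isIn]
  simp only [Bool.not_eq_eq_eq_not, Bool.not_true, List.isEmpty_eq_false_iff_exists_mem]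
  constructor
  · rintro ⟨i, hi⟩
    rw [mem_pyPositions] at hi
    exact ⟨i.toNat, hi.2.2⟩
  · rintro ⟨j, hpre⟩
    by_cases hj : j ≤ name.toList.length
    · have hlen := hpre.length_le
      rw [List.length_drop] at hlen
      refine ⟨(j : Int), ?_⟩
      rw [mem_pyPositions]
      exact ⟨by omega, by omega, by simpa using hpre⟩
    · have hnil : name.toList.drop j = [] := List.drop_eq_nil_of_le (by omega)
      rw [hnil] at hpre
      have hsub : substring.toList = [] := List.prefix_nil.mp hpre
      refine ⟨0, ?_⟩
      rw [mem_pyPositions, hsub]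
      exact ⟨le_refl _, by simp, List.nil_prefix⟩

-- B's fused loop splits into three independent folds.
theorem triple_fold_split (l : List String) (p q r : String → Bool) (b e c : Int) :
    l.foldl (fun (s : Int × Int × Int) name =>
      (if p name then s.1 + 1 else s.1,
       if q name then s.2.1 + 1 else s.2.1,
       if r name then s.2.2 + 1 else s.2.2)) (b, e, c)
    = (l.foldl (fun a n => if p n then a + 1 else a) b,
       l.foldl (fun a n => if q n then a + 1 else a) e,
       l.foldl (fun a n => if r n then a + 1 else a) c) := by
  induction l generalizing b e c with
  | nil => rfl
  | cons h t ih => simp [List.foldl, ih]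

-- Each of A's loops only touches its own slot: fold over a concrete 3-list.
theorem slot_fold (l : List String) (p : String → Bool) (i : Nat) (x y z : Int) (hi : i < 3) :
    l.foldl (fun (r : List Int) name => if p name then r.set i (r.getD i 0 + 1) else r) [x, y, z]
    = [if i = 0 then l.foldl (fun a n => if p n then a + 1 else a) x else x,
       if i = 1 then l.foldl (fun a n => if p n then a + 1 else a) y else y,
       if i = 2 then l.foldl (fun a n => if p n then a + 1 else a) z else z] := by
  induction l generalizing x y z with
  | nil => simp
  | cons h t ih =>
    interval_cases i <;> by_cases hp : p h <;>
      simp only [List.foldl, hp, if_true, Bool.false_eq_true, if_false] <;>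
      exact (ih _ _ _).trans (by simp)

-- ===== VERDICT (by name: the statement is the Claim_ definition above) =====
theorem calculate_spec : Claim_equal_calculate := by
  intro name_list substring _
  show calculate name_list substring = calculate_alt name_list substring
  simp only [calculate, calculate_alt]
  rw [triple_fold_split]
  rw [slot_fold (i := 0) (hi := by omega), slot_fold (i := 1) (hi := by omega),
    slot_fold (i := 2) (hi := by omega)]
  simp only [positions_contains_zero, positions_contains_last, positions_nonempty]
  simp
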